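-- pv_equiv track=rewrite | github.com/williamdothardy33/python_algos | recursion.py | add_until_100
-- ===== SOURCE A (Python) =====
-- def add_until_100(ns, ns_length, pointer=0):
--     if pointer >= ns_length:
--         return 0
--     rest = add_until_100(ns, ns_length, pointer + 1)
--     total = ns[pointer] + rest
--     if  total > 100:
--         return rest
--     else:
--         return total
-- ===== SOURCE B (Python) =====
-- def add_until_100(ns, ns_length, pointer=0):
--     total = 0
--     for i in reversed(range(pointer, ns_length)):
--         if ns[i] + total <= 100:
--             total += ns[i]
--     return total
-- ===== Notes on version B (the rewrite author's own statement) =====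
-- stated objective: simpler
-- what changed: Replaced the suffix-first recursion with an iterative accumulator loop over the indices in reverse order, eliminating recursion depth.
import Mathlib
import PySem

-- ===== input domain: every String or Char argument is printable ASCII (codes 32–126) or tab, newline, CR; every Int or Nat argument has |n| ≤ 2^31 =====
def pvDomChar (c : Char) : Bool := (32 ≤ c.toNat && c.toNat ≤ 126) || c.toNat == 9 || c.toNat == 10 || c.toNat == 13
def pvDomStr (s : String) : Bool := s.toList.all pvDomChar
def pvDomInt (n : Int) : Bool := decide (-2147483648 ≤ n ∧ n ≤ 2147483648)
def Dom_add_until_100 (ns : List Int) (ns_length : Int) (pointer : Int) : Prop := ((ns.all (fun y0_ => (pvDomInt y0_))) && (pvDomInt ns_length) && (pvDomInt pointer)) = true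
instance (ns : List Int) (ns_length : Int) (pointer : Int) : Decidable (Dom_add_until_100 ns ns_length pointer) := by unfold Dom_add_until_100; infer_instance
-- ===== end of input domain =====

-- B replaces A's suffix-first recursion by an iterative reverse-order loop with an accumulator (objective: simpler, no recursion depth).

-- ===== PORT A =====
-- literal port of A's recursion; (pyGet? …).getD 0 totalizes the indexing (Pre_ keeps indices valid)
def add_until_100 (ns : List Int) (ns_length : Int) (pointer : Int) : Int :=
  if _h : pointer ≥ ns_length then 0
  else
    let rest := add_until_100 ns ns_length (pointer + 1)
    let total := (PySem.List.pyGet? ns pointer).getD 0 + rest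
    if total > 100 then rest else total
termination_by (ns_length - pointer).toNat
decreasing_by omega

-- ===== PORT B =====
-- literal port of Source B: total = 0; for i in reversed(range(pointer, ns_length)): if ns[i] + total <= 100: total += ns[i]
def add_until_100_alt (ns : List Int) (ns_length : Int) (pointer : Int) : Int :=
  ((PySem.List.pyRange pointer ns_length 1).reverse).foldl
    (fun total i =>
      if (PySem.List.pyGet? ns i).getD 0 + total ≤ 100 then
        total + (PySem.List.pyGet? ns i).getD 0
      else total) 0

-- ===== PRECONDITION & SPEC =====
-- Pre_ excludes exactly the inputs where Python's ns[i] raises IndexError for some visited index i (both A and B raise there)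
def Pre_add_until_100 (ns : List Int) (ns_length : Int) (pointer : Int) : Prop :=
  pointer < ns_length → (-(ns.length : Int) ≤ pointer ∧ ns_length ≤ (ns.length : Int))
instance (ns : List Int) (ns_length : Int) (pointer : Int) : Decidable (Pre_add_until_100 ns ns_length pointer) := by unfold Pre_add_until_100; infer_instance
def pvWitness_add_until_100 : List Int × Int × Int := ([10, 200, 50], 3, 0)
def Spec_add_until_100 (ns : List Int) (ns_length : Int) (pointer : Int) (out : Int) : Prop := out = add_until_100_alt ns ns_length pointer
instance (ns : List Int) (ns_length : Int) (pointer : Int) (out : Int) : Decidable (Spec_add_until_100 ns ns_length pointer out) := by unfold Spec_add_until_100; infer_instance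

-- ===== CLAIM (what is proved, stated in full; the proofs are below) =====
def Claim_equal_add_until_100 : Prop := ∀ (ns : List Int) (ns_length : Int) (pointer : Int), Dom_add_until_100 ns ns_length pointer → Pre_add_until_100 ns ns_length pointer → Spec_add_until_100 ns ns_length pointer (add_until_100 ns ns_length pointer)

-- ===== LEMMAS AND PROOFS =====

-- A's recursion equals the foldr of the step over the ascending index range
theorem addA_eq_foldr (ns : List Int) (ns_length pointer : Int) :
    add_until_100 ns ns_length pointer =
      (PySem.List.pyRange pointer ns_length 1).foldr
        (fun i total =>
          if (PySem.List.pyGet? ns i).getD 0 + total ≤ 100 then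
            total + (PySem.List.pyGet? ns i).getD 0
          else total) 0 := by
  rw [add_until_100]
  split
  · rw [PySem.List.pyRange_one_eq_nil (by omega)]; rfl
  · rw [PySem.List.pyRange_one_cons (by omega), List.foldr_cons,
      ← addA_eq_foldr ns ns_length (pointer + 1)]
    simp only []
    set rest := add_until_100 ns ns_length (pointer + 1)
    set v := (PySem.List.pyGet? ns pointer).getD 0
    by_cases h : v + rest ≤ 100
    · rw [if_neg (by omega), if_pos h]; omega
    · rw [if_pos (by omega), if_neg h]
termination_by (ns_length - pointer).toNat
decreasing_by omega

-- ===== VERDICT (by name: the statement is the Claim_ definition above) =====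
theorem add_until_100_spec : Claim_equal_add_until_100 := by
  intro ns L p _ _
  unfold Spec_add_until_100 add_until_100_alt
  rw [List.foldl_reverse, addA_eq_foldr]
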